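-- pv_equiv track=rewrite | github.com/ramaniji/relations_python | partial_order.py | findUpperBounds
-- ===== SOURCE A (Python) =====
-- def findUpperBounds(A,   R,   P):
--
--     C = []
--     for k in range(len(A)):
--         s = 0
--         temp = A[k]
--         for i in range(len(P)):
--             if( [P[i],  temp] in R):
--                 s = s + 1
--         if(s == len(P)):
--             C.append(temp)
--     return(C)
-- ===== SOURCE B (Python) =====
-- def findUpperBounds(A, R, P):
--     C = list(A)
--     for p in P:
--         C = [a for a in C if [p, a] in R]
--     return C
-- ===== Notes on version B (the rewrite author's own statement) =====
-- stated objective: faster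
-- what changed: B replaces A's per-element counting of satisfied constraints (inner loop counting s and comparing to len(P)) by successive filtering: it starts from all of A and applies one constraint p at a time, shrinking the candidate list so elements failing an early constraint are never tested against the rest.
import Mathlib
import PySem

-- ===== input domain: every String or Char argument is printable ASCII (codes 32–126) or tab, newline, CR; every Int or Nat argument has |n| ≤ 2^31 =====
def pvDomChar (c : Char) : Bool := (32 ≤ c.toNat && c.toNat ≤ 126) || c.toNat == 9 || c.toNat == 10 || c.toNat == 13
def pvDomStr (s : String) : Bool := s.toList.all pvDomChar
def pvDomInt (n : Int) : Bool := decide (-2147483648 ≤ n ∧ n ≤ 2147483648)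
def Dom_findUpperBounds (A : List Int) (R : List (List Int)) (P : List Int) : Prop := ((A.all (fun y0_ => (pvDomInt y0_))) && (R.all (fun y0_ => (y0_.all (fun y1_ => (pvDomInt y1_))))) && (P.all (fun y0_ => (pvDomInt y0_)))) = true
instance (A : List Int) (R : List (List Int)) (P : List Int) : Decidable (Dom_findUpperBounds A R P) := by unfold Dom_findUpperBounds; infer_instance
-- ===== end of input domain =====

-- B filters the candidate list by one constraint of P at a time instead of counting satisfied constraints per element; measurably faster since failing candidates are dropped at their first failing constraint.
-- ===== PORT A =====
-- Transliteration of A: index loop over A, inner index loop over P counting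
-- satisfied constraints into s (a Python int -> Int), append temp when s == len(P).
def findUpperBounds (A : List Int) (R : List (List Int)) (P : List Int) : List Int :=
  (List.range A.length).foldl (fun C k =>
    if ((List.range P.length).foldl
          (fun s i => if [P.getD i 0, A.getD k 0] ∈ R then s + 1 else s) (0 : Int))
        = (P.length : Int)
    then C ++ [A.getD k 0] else C) []

-- ===== PORT B =====
-- B: start from all of A, apply one constraint p at a time by filtering.
def findUpperBounds_alt (A : List Int) (R : List (List Int)) (P : List Int) : List Int :=
  P.foldl (fun C p => C.filter (fun a => decide ([p, a] ∈ R))) A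

-- ===== PRECONDITION & SPEC =====
def Spec_findUpperBounds (A : List Int) (R : List (List Int)) (P : List Int) (out : List Int) : Prop := out = findUpperBounds_alt A R P
instance (A : List Int) (R : List (List Int)) (P : List Int) (out : List Int) : Decidable (Spec_findUpperBounds A R P out) := by unfold Spec_findUpperBounds; infer_instance

-- ===== CLAIM (what is proved, stated in full; the proofs are below) =====
def Claim_equal_findUpperBounds : Prop := ∀ (A : List Int) (R : List (List Int)) (P : List Int), Dom_findUpperBounds A R P → Spec_findUpperBounds A R P (findUpperBounds A R P)

-- ===== LEMMAS AND PROOFS =====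

-- ===== VERDICT (by name: the statement is the Claim_ definition above) =====
-- foldl over range(len(L)) indexing L = foldl over L itself
theorem pv_foldl_range_getD {α β : Type} (g : β → α → β) (d : α) :
    ∀ (L : List α) (init : β),
      (List.range L.length).foldl (fun s i => g s (L.getD i d)) init = L.foldl g init := by
  intro L
  induction L with
  | nil => intro init; simp
  | cons x xs ih =>
    intro init
    simp only [List.length_cons, List.range_succ_eq_map, List.foldl_cons, List.foldl_map,
      List.getD_cons_zero, List.getD_cons_succ]
    exact ih (g init x)

-- the append-if accumulator loop builds acc ++ filter
theorem pv_foldl_append (p : Int → Prop) [DecidablePred p] :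
    ∀ (A acc : List Int),
      A.foldl (fun C a => if p a then C ++ [a] else C) acc = acc ++ A.filter (fun a => decide (p a)) := by
  intro A
  induction A with
  | nil => intro acc; simp
  | cons x xs ih =>
    intro acc
    by_cases hx : p x <;> simp [hx, ih, List.append_assoc]

-- successive filtering = one filter by the conjunction of all constraints
theorem pv_foldl_filter (R : List (List Int)) :
    ∀ (P : List Int) (C : List Int),
      P.foldl (fun C p => C.filter (fun a => decide ([p, a] ∈ R))) C
        = C.filter (fun a => P.all (fun p => decide ([p, a] ∈ R))) := by
  intro P
  induction P with
  | nil => intro C; simp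
  | cons p ps ih =>
    intro C
    simp only [List.foldl_cons, ih, List.filter_filter, List.all_cons]
    exact List.filter_congr (fun a _ => Bool.and_comm _ _)

theorem findUpperBounds_spec : Claim_equal_findUpperBounds := by
  intro A R P _
  unfold Spec_findUpperBounds findUpperBounds findUpperBounds_alt
  rw [pv_foldl_filter]
  refine Eq.trans
    (pv_foldl_range_getD
      (fun C temp =>
        if ((List.range P.length).foldl
              (fun s i => if [P.getD i 0, temp] ∈ R then s + 1 else s) (0 : Int))
            = (P.length : Int)
        then C ++ [temp] else C) 0 A []) ?_
  rw [pv_foldl_append]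
  simp only [List.nil_append]
  apply List.filter_congr
  intro a _
  rw [pv_foldl_range_getD (fun s p => if [p, a] ∈ R then s + 1 else s) 0 P,
      PySem.List.foldl_ite_add_one]
  have h2 : ((0 : Int) + (P.countP (fun p => decide ([p, a] ∈ R)) : Int) = (P.length : Int))
      ↔ (P.all (fun p => decide ([p, a] ∈ R)) = true) := by
    rw [zero_add, Int.natCast_inj, List.countP_eq_length, List.all_eq_true]
  cases hq : P.all (fun p => decide ([p, a] ∈ R)) with
  | true => simp [h2.mpr hq]
  | false =>
    have hne : ¬ ((0 : Int) + (P.countP (fun p => decide ([p, a] ∈ R)) : Int) = (P.length : Int)) := by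
      intro h; rw [h2.mp h] at hq; exact Bool.true_eq_false.mp hq
    exact decide_eq_false hne
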